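-- pv_equiv track=rewrite | github.com/mehmetcanyuney/mrm4006_graduationproject_mcyuney | VoiceRecognition/helpFunctions.py | search_number_string
-- ===== SOURCE A (Python) =====
-- def search_number_string(string):
--     index_list = []
--     del index_list[:]
--     for i, x in enumerate(string):
--         if x.isdigit():
--             index_list.append(i)
--     if len(index_list) == 0:
--         return None
--     start = index_list[0]
--     end = index_list[-1] + 1
--     ret = string[start:end]
--     return ret
-- ===== SOURCE B (Python) =====
-- def search_number_string(string):
--     n = len(string)
--     start = 0
--     while start < n and not string[start].isdigit():
--         start += 1
--     if start == n:
--         return None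
--     last = n - 1
--     while not string[last].isdigit():
--         last -= 1
--     return string[start:last + 1]
-- ===== Notes on version B (the rewrite author's own statement) =====
-- stated objective: alternative
-- what changed: Replaces the single pass that collects every digit index into a list with two opposite-direction scans that stop at the first digit from the left and from the right, then one slice; no index list is built.
import Mathlib
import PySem

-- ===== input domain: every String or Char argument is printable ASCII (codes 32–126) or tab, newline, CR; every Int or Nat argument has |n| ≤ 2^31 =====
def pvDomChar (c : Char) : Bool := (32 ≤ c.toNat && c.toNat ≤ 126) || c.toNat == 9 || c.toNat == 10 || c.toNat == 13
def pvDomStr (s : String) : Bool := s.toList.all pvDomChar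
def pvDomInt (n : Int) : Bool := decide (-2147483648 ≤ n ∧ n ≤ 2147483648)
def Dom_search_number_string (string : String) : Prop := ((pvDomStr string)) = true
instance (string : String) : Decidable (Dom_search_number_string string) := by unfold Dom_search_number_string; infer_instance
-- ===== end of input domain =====

-- B replaces A's single pass collecting all digit indices by two opposite-direction
-- scans (first digit from the left, first digit from the right) and one slice.


-- ===== PORT A =====
def search_number_string (string : String) : Option String :=
  let index_list : List Int :=
    (PySem.List.enumerate string.toList 0).foldl
      (fun acc p => if PySem.Chars.isdigit p.2 then acc ++ [p.1] else acc) []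
  if index_list.length = 0 then none
  else
    -- index_list[0] and index_list[-1] on a list known nonempty
    let start := index_list.headD 0
    let «end» := index_list.getLastD 0 + 1
    some (PySem.Str.slice string (some start) (some «end»))

-- ===== PORT B =====
-- left-to-right scan: index of the first digit (B's first while loop)
def pvFwdScan (cs : List Char) : Option Nat :=
  match cs with
  | [] => none
  | c :: t => if PySem.Chars.isdigit c then some 0 else (pvFwdScan t).map (· + 1)

def search_number_string_alt (string : String) : Option String :=
  let cs := string.toList
  match pvFwdScan cs with
  | none => none
  | some start =>
    -- right-to-left scan (B's second while loop): first digit of the reversed list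
    let last := cs.length - 1 - (pvFwdScan cs.reverse).getD 0
    some (String.ofList ((cs.drop start).take (last + 1 - start)))

-- ===== PRECONDITION & SPEC =====
def Spec_search_number_string (string : String) (out : Option String) : Prop := out = search_number_string_alt string
instance (string : String) (out : Option String) : Decidable (Spec_search_number_string string out) := by unfold Spec_search_number_string; infer_instance

-- ===== CLAIM (what is proved, stated in full; the proofs are below) =====
def Claim_equal_search_number_string : Prop := ∀ (string : String), Dom_search_number_string string → Spec_search_number_string string (search_number_string string)

-- ===== LEMMAS AND PROOFS =====

-- the digit-index list A builds, with a generic starting offset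
def pvDs (cs : List Char) (s : Int) : List Int :=
  ((PySem.List.enumerate cs s).filter (fun q => PySem.Chars.isdigit q.2)).map (·.1)

theorem pvDs_cons (c : Char) (t : List Char) (s : Int) :
    pvDs (c :: t) s =
      if PySem.Chars.isdigit c then s :: pvDs t (s + 1) else pvDs t (s + 1) := by
  simp [pvDs, PySem.List.enumerate_cons, List.filter]
  split_ifs with h <;> simp [h]

theorem pvFwdScan_lt (cs : List Char) (k : Nat) (h : pvFwdScan cs = some k) :
    k < cs.length := by
  induction cs generalizing k with
  | nil => simp [pvFwdScan] at h
  | cons c t ih =>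
    rw [pvFwdScan] at h
    split at h
    · simp at h; simp; omega
    · cases ht : pvFwdScan t with
      | none => rw [ht] at h; simp at h
      | some j => rw [ht] at h; simp at h; have := ih j ht; simp; omega

theorem pvHead (cs : List Char) (s : Int) :
    (pvDs cs s).head? = (pvFwdScan cs).map (fun k => s + (k : Int)) := by
  induction cs generalizing s with
  | nil => simp [pvDs, pvFwdScan, PySem.List.enumerate_nil]
  | cons c t ih =>
    rw [pvDs_cons, pvFwdScan]
    split
    · simp
    · rw [ih]
      cases pvFwdScan t <;> simp
      ring

theorem pvLast (cs : List Char) (s : Int) :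
    (pvDs cs s).getLast? =
      (pvFwdScan cs.reverse).map (fun k => s + ((cs.length - 1 - k : Nat) : Int)) := by
  induction cs using List.reverseRecOn with
  | nil => simp [pvDs, pvFwdScan, PySem.List.enumerate_nil]
  | append_singleton xs x ih =>
    have hds : pvDs (xs ++ [x]) s =
        pvDs xs s ++ (if PySem.Chars.isdigit x then [s + (xs.length : Int)] else []) := by
      simp [pvDs, PySem.List.enumerate_append, PySem.List.enumerate_cons,
        PySem.List.enumerate_nil, List.filter_append, List.filter]
      split_ifs with h <;> simp [h]
    rw [hds, List.reverse_append]
    simp only [List.reverse_singleton, List.singleton_append, pvFwdScan]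
    split_ifs with h
    · simp
    · simp only [List.append_nil]
      rw [ih]
      cases h2 : pvFwdScan xs.reverse with
      | none => simp
      | some k =>
        have hb : k < xs.length := by
          have := pvFwdScan_lt _ _ h2; simpa using this
        simp only [Option.map_some]
        congr 1
        have : xs.length - 1 - k = (xs ++ [x]).length - 1 - (k + 1) := by
          simp; omega
        simp [this]
theorem search_number_string_spec : Claim_equal_search_number_string := by
  intro string _
  unfold Spec_search_number_string search_number_string search_number_string_alt
  simp only [PySem.List.foldl_append_if, List.nil_append]
  have hds : List.map (fun q => q.1)
      (List.filter (fun q => PySem.Chars.isdigit q.2) (PySem.List.enumerate string.toList 0)) =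
      pvDs string.toList 0 := rfl
  rw [hds]
  cases hf : pvFwdScan string.toList with
  | none =>
    have h0 : pvDs string.toList 0 = [] := by
      have h := pvHead string.toList 0
      rw [hf] at h; simpa using h
    simp [h0]
  | some st =>
    have hh := pvHead string.toList 0
    rw [hf] at hh
    have hne : pvDs string.toList 0 ≠ [] := by
      intro h; rw [h] at hh; simp at hh
    have hl := pvLast string.toList 0
    obtain ⟨k, hk⟩ : ∃ k, pvFwdScan string.toList.reverse = some k := by
      cases h2 : pvFwdScan string.toList.reverse with
      | none =>
        rw [h2] at hl; simp at hl
        exact absurd hl hne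
      | some k => exact ⟨k, rfl⟩
    rw [hk] at hl
    have hlen : pvDs string.toList 0 ≠ [] → ¬ (pvDs string.toList 0).length = 0 := by
      simp
    rw [if_neg (hlen hne)]
    have hstart : (pvDs string.toList 0).headD 0 = (st : Int) := by
      rw [List.headD_eq_head?_getD, hh]; simp
    have hlast : (pvDs string.toList 0).getLastD 0 =
        ((string.toList.length - 1 - k : Nat) : Int) := by
      rw [List.getLastD_eq_getLast?, hl]; simp
    rw [hstart, hlast, hk]
    have hcast : ((string.toList.length - 1 - k : Nat) : Int) + 1 =
        ((string.toList.length - 1 - k + 1 : Nat) : Int) := by push_cast; ring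
    rw [hcast]
    simp only [PySem.Str.slice, PySem.Chars.slice, PySem.List.slice_natCast, Option.getD_some]
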